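-- pv_equiv track=rewrite | github.com/MaxKostov/MdLabs | lab2/problem_3.py | has_consecutive_numbers
-- ===== SOURCE A (Python) =====
-- def has_consecutive_numbers(input_string):
--     has = []
--     for i in range(len(input_string) - 1):
--         current_char = input_string[i]
--         next_char = input_string[i + 1]
--
--         if current_char.isdigit() and next_char.isdigit():
--             if int(next_char) == int(current_char) + 1:
--                 return True
--
--     return False
-- ===== SOURCE B (Python) =====
-- def has_consecutive_numbers(input_string):
--     return any(p in input_string
--                for p in ("01", "12", "23", "34", "45", "56", "67", "78", "89"))
-- ===== Notes on version B (the rewrite author's own statement) =====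
-- stated objective: faster
-- what changed: Replaces the explicit index loop with per-character isdigit() checks and int() arithmetic by a single any() over substring containment tests against the nine two-character increasing consecutive digit pairs.
import Mathlib
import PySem

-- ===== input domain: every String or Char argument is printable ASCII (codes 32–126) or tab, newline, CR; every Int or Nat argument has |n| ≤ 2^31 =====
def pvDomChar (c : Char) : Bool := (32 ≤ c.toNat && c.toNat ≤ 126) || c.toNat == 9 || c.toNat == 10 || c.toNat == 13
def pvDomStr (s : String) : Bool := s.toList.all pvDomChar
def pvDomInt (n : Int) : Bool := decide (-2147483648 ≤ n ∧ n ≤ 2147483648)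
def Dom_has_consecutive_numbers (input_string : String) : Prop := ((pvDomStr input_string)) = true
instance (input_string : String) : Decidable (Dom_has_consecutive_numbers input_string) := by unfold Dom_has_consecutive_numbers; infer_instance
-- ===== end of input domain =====

-- B replaces A's index loop with per-char isdigit()/int() arithmetic by a single any() over
-- substring tests against the nine increasing consecutive digit pairs (measured constant-factor faster:
-- the scan runs in the interpreter's C substring search instead of Python-level per-index work).

-- ===== PORT A =====
-- one iteration's body: input_string[i], input_string[i+1], isdigit checks, int() comparison
-- (indices produced by range(len-1) are always in range, and int() of a digit char never
-- raises, so pyGetD's default and the match's catch-all arms are unreachable)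
def pvStepA (cs : List Char) (i : Int) : Bool :=
  let current_char := PySem.List.pyGetD cs i ' '
  let next_char := PySem.List.pyGetD cs (i + 1) ' '
  if PySem.Chars.isdigit current_char && PySem.Chars.isdigit next_char then
    match PySem.Int.ofChars? [next_char], PySem.Int.ofChars? [current_char] with
    | some nn, some nc => nn == nc + 1
    | _, _ => false
  else false

-- 'for i in range(len(input_string) - 1): … return True' with early return
def pvLoopA (cs : List Char) : List Int → Bool
  | [] => false
  | i :: rest => if pvStepA cs i then true else pvLoopA cs rest

def has_consecutive_numbers (input_string : String) : Bool :=
  pvLoopA input_string.toList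
    (PySem.List.pyRange 0 (PySem.Str.len input_string - 1) 1)

-- ===== PORT B =====
def pvPatterns : List String := ["01", "12", "23", "34", "45", "56", "67", "78", "89"]

def has_consecutive_numbers_alt (input_string : String) : Bool :=
  pvPatterns.any (fun p => PySem.Str.isIn p input_string)

-- ===== PRECONDITION & SPEC =====
def Spec_has_consecutive_numbers (input_string : String) (out : Bool) : Prop := out = has_consecutive_numbers_alt input_string
instance (input_string : String) (out : Bool) : Decidable (Spec_has_consecutive_numbers input_string out) := by unfold Spec_has_consecutive_numbers; infer_instance

-- ===== CLAIM (what is proved, stated in full; the proofs are below) =====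
def Claim_equal_has_consecutive_numbers : Prop := ∀ (input_string : String), Dom_has_consecutive_numbers input_string → Spec_has_consecutive_numbers input_string (has_consecutive_numbers input_string)

-- ===== LEMMAS AND PROOFS =====

-- the nine consecutive digit pairs, as characters
def pvPairs : List (Char × Char) :=
  [('0','1'), ('1','2'), ('2','3'), ('3','4'), ('4','5'),
   ('5','6'), ('6','7'), ('7','8'), ('8','9')]

-- direct adjacent-pair scan: the common shape both ports reduce to
def pvScan : List Char → Bool
  | c :: d :: rest => decide ((c, d) ∈ pvPairs) || pvScan (d :: rest)
  | _ => false

lemma pv_digit_mem (c : Char) (h1 : '0' ≤ c) (h2 : c ≤ '9') :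
    c ∈ ['0','1','2','3','4','5','6','7','8','9'] := by
  have hl : 48 ≤ c.toNat := h1
  have hr : c.toNat ≤ 57 := h2
  have hc : c = Char.ofNat c.toNat := (Char.ofNat_toNat c).symm
  interval_cases h : c.toNat <;> rw [hc] <;> decide

-- A's per-iteration check equals membership in pvPairs
lemma pvStepA_chk (c d : Char) :
    (if PySem.Chars.isdigit c && PySem.Chars.isdigit d then
      match PySem.Int.ofChars? [d], PySem.Int.ofChars? [c] with
      | some nn, some nc => nn == nc + 1
      | _, _ => false
    else false) = decide ((c, d) ∈ pvPairs) := by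
  by_cases hc : PySem.Chars.isdigit c = true
  · by_cases hd : PySem.Chars.isdigit d = true
    · simp only [PySem.Chars.isdigit, Bool.and_eq_true, decide_eq_true_eq] at hc hd
      have hcm := pv_digit_mem c hc.1 hc.2
      have hdm := pv_digit_mem d hd.1 hd.2
      fin_cases hcm <;> fin_cases hdm <;> decide
    · have : (c, d) ∉ pvPairs := by
        intro hm; apply hd; fin_cases hm <;> decide
      simp [hd, this]
  · have : (c, d) ∉ pvPairs := by
      intro hm; apply hc; fin_cases hm <;> decide
    simp [hc, this]

lemma pvStepA_eq (cs : List Char) (k : Nat) (h : k + 1 < cs.length) :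
    pvStepA cs (k : Int) = decide ((cs[k], cs[k+1]) ∈ pvPairs) := by
  have h1 : ((k : Int) + 1) = ((k + 1 : Nat) : Int) := by push_cast; ring
  unfold pvStepA
  rw [h1]
  simp only [PySem.List.pyGetD_natCast]
  rw [List.getD_eq_getElem _ _ (by omega), List.getD_eq_getElem _ _ h]
  exact pvStepA_chk cs[k] cs[k+1]

-- the loop from index k onward is the scan of the suffix from k
lemma pvLoopA_eq_scan (cs : List Char) (k : Nat) (hk : k ≤ cs.length) :
    pvLoopA cs (PySem.List.pyRange (k : Int) ((cs.length : Int) - 1) 1) =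
      pvScan (cs.drop k) := by
  by_cases h : k + 1 < cs.length
  · rw [PySem.List.pyRange_one_cons (by omega : (k : Int) < (cs.length : Int) - 1)]
    have hdrop : cs.drop k = cs[k] :: cs[k+1] :: cs.drop (k + 2) := by
      rw [List.drop_eq_getElem_cons (by omega), List.drop_eq_getElem_cons h]
    have hrec : pvLoopA cs (PySem.List.pyRange ((k : Int) + 1) ((cs.length : Int) - 1) 1) =
        pvScan (cs.drop (k + 1)) := by
      have : ((k : Int) + 1) = ((k + 1 : Nat) : Int) := by push_cast; ring
      rw [this]; exact pvLoopA_eq_scan cs (k + 1) (by omega)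
    have hdrop1 : cs.drop (k + 1) = cs[k+1] :: cs.drop (k + 2) :=
      List.drop_eq_getElem_cons h
    rw [hdrop]
    show (if pvStepA cs (k : Int) then true else _) = _
    rw [pvStepA_eq cs k h]
    by_cases hp : (cs[k], cs[k+1]) ∈ pvPairs
    · simp [pvScan, hp]
    · simp only [hp, decide_false, Bool.false_or, pvScan, if_neg, Bool.false_eq_true,
        not_false_eq_true]
      rw [hrec, hdrop1]
  · -- fewer than two characters remain: empty range, scan of a short list is false
    have hempty : PySem.List.pyRange (k : Int) ((cs.length : Int) - 1) 1 = [] := by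
      rw [PySem.List.pyRange_of_pos _ _ (by omega : (0:Int) < 1),
        if_neg (by omega : ¬ (k : Int) < (cs.length : Int) - 1)]
      simp
    rw [hempty]
    have : cs.drop k = [] ∨ ∃ c, cs.drop k = [c] := by
      have hlen : (cs.drop k).length ≤ 1 := by simp; omega
      match hd : cs.drop k with
      | [] => exact Or.inl rfl
      | [c] => exact Or.inr ⟨c, rfl⟩
      | c :: d :: t => rw [hd] at hlen; simp at hlen
    rcases this with h0 | ⟨c, h1⟩
    · simp [h0, pvScan, pvLoopA]
    · simp [h1, pvScan, pvLoopA]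
termination_by cs.length - k

-- B over the character list
lemma pv_alt_eq_scan (cs : List Char) :
    pvPatterns.any (fun p => PySem.Chars.isIn p.toList cs) = pvScan cs := by
  match cs with
  | [] => decide
  | [c] =>
    show _ = false
    simp only [List.any_eq_false]
    intro p hp
    rw [PySem.Chars.isIn_iff_infix]
    intro hinf
    have := hinf.length_le
    fin_cases hp <;> simp_all
  | c :: d :: rest =>
    have ih := pv_alt_eq_scan (d :: rest)
    show _ = (decide ((c, d) ∈ pvPairs) || pvScan (d :: rest))
    rw [← ih]
    rcases Bool.eq_false_or_eq_true (pvPatterns.any (fun p => PySem.Chars.isIn p.toList (d :: rest))) with hr | hr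
    · -- tail already matches: both sides true
      rw [hr, Bool.or_true]
      rw [List.any_eq_true] at hr ⊢
      obtain ⟨p, hpm, hpin⟩ := hr
      refine ⟨p, hpm, ?_⟩
      rw [PySem.Chars.isIn_iff_infix] at hpin ⊢
      exact hpin.trans (List.suffix_cons c (d :: rest)).isInfix
    · -- tail has no match: head pair decides everything
      rw [hr, Bool.or_false]
      rcases Bool.eq_false_or_eq_true (decide ((c, d) ∈ pvPairs)) with hp | hp
      · rw [hp]
        rw [decide_eq_true_eq] at hp
        rw [List.any_eq_true]
        fin_cases hp
        · exact ⟨"01", by decide, by rw [PySem.Chars.isIn_iff_infix]; exact ⟨[], rest, rfl⟩⟩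
        · exact ⟨"12", by decide, by rw [PySem.Chars.isIn_iff_infix]; exact ⟨[], rest, rfl⟩⟩
        · exact ⟨"23", by decide, by rw [PySem.Chars.isIn_iff_infix]; exact ⟨[], rest, rfl⟩⟩
        · exact ⟨"34", by decide, by rw [PySem.Chars.isIn_iff_infix]; exact ⟨[], rest, rfl⟩⟩
        · exact ⟨"45", by decide, by rw [PySem.Chars.isIn_iff_infix]; exact ⟨[], rest, rfl⟩⟩
        · exact ⟨"56", by decide, by rw [PySem.Chars.isIn_iff_infix]; exact ⟨[], rest, rfl⟩⟩
        · exact ⟨"67", by decide, by rw [PySem.Chars.isIn_iff_infix]; exact ⟨[], rest, rfl⟩⟩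
        · exact ⟨"78", by decide, by rw [PySem.Chars.isIn_iff_infix]; exact ⟨[], rest, rfl⟩⟩
        · exact ⟨"89", by decide, by rw [PySem.Chars.isIn_iff_infix]; exact ⟨[], rest, rfl⟩⟩
      · rw [hp]
        simp only [List.any_eq_false] at hr ⊢
        intro p hpm
        have hrp := hr p hpm
        rw [PySem.Chars.isIn_iff_infix] at hrp ⊢
        intro hinf
        rw [List.infix_cons_iff] at hinf
        rcases hinf with hpre | htl
        · -- p is a 2-char prefix of c :: d :: rest, contradicting (c, d) ∉ pvPairs
          rw [decide_eq_false_iff_not] at hp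
          apply hp
          fin_cases hpm <;>
            (obtain ⟨t, ht⟩ := hpre; simp at ht; simp [pvPairs, ← ht.1, ← ht.2.1])
        · exact hrp htl

-- ===== VERDICT (by name: the statement is the Claim_ definition above) =====
theorem has_consecutive_numbers_spec : Claim_equal_has_consecutive_numbers := by
  intro s _
  show has_consecutive_numbers s = has_consecutive_numbers_alt s
  unfold has_consecutive_numbers has_consecutive_numbers_alt
  have hlen : PySem.Str.len s - 1 = ((s.toList.length : Int) - 1) := by
    simp [pysem]
  rw [hlen]
  have h0 : (0 : Int) = ((0 : Nat) : Int) := rfl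
  rw [h0, pvLoopA_eq_scan s.toList 0 (by omega), List.drop_zero]
  rw [← pv_alt_eq_scan s.toList]
  simp [pysem]
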